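-- pv_equiv track=rewrite | github.com/wadefletch/advent-of-code-2020 | 06/solution.py | part_two
-- ===== SOURCE A (Python) =====
-- def part_two(input):
--     total = 0
--
--     for group in input.split('\n\n'):
--         people = group.split('\n')
--         letters = set(people[0])
--         for person in people[1:]:
--             letters = letters.intersection(person)
--
--         total += len(letters)
--
--     return total
-- ===== SOURCE B (Python) =====
-- def part_two(input):
--     total = 0
--     for group in input.split('\n\n'):
--         people = group.split('\n')
--         counts = {}
--         for person in people:
--             for c in set(person):
--                 counts[c] = counts.get(c, 0) + 1
--         total += sum(1 for v in counts.values() if v == len(people))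
--     return total
-- ===== Notes on version B (the rewrite author's own statement) =====
-- stated objective: idiomatic
-- what changed: Replaces the running set-intersection per group with a frequency table tallying each person's distinct letters once, then counts letters whose tally equals the number of people.
import Mathlib
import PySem

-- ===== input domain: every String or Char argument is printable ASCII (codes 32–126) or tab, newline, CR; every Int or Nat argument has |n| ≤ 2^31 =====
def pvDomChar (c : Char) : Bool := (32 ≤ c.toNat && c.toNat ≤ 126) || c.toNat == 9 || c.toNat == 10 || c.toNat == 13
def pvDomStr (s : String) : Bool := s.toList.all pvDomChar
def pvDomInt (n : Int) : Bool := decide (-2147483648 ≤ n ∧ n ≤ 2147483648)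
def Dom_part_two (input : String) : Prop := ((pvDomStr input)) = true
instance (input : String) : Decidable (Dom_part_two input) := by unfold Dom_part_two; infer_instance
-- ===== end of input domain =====

-- B replaces A's running set-intersection per group by a per-letter frequency table
-- (idiomatic counting pass); equivalence of the return values is proved on the whole domain.

-- ===== PORT A =====
-- splitOn never returns [], so `people.headD []` is Python's `people[0]` (no IndexError).
def part_two (input : String) : Int :=
  (PySem.Chars.splitOn input.toList ['\n', '\n']).foldl (fun total group =>
    let people := PySem.Chars.splitOn group ['\n']
    let letters := (PySem.List.slice people (some 1)).foldl
        (fun letters person => PySem.Set.inter letters person)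
        (PySem.Set.ofList (people.headD []))
    total + PySem.Set.len letters) 0

-- ===== PORT B =====
def part_two_alt (input : String) : Int :=
  (PySem.Chars.splitOn input.toList ['\n', '\n']).foldl (fun total group =>
    let people := PySem.Chars.splitOn group ['\n']
    let counts := people.foldl (fun d person =>
        (PySem.Set.ofList person).foldl (fun d c => d.insert c (d.getD c 0 + 1)) d)
      PySem.Dict.empty
    total + ((counts.values.countP (fun v => v == (people.length : Int))) : Int)) 0

-- ===== PRECONDITION & SPEC =====
def Spec_part_two (input : String) (out : Int) : Prop := out = part_two_alt input
instance (input : String) (out : Int) : Decidable (Spec_part_two input out) := by unfold Spec_part_two; infer_instance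

-- ===== CLAIM (what is proved, stated in full; the proofs are below) =====
def Claim_equal_part_two : Prop := ∀ (input : String), Dom_part_two input → Spec_part_two input (part_two input)

-- ===== LEMMAS AND PROOFS =====

-- membership in A's running intersection
theorem mem_foldl_inter (rest : List (List Char)) (s : PySem.Set Char) (c : Char) :
    c ∈ rest.foldl (fun l p => PySem.Set.inter l p) s ↔ c ∈ s ∧ ∀ p ∈ rest, c ∈ p := by
  induction rest generalizing s with
  | nil => simp
  | cons p rest ih =>
    simp [List.foldl_cons, ih, PySem.Set.mem_inter, and_assoc]

theorem nodup_foldl_inter (rest : List (List Char)) (s : PySem.Set Char) (h : s.Nodup) :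
    (rest.foldl (fun l p => PySem.Set.inter l p) s).Nodup := by
  induction rest generalizing s with
  | nil => exact h
  | cons p rest ih => exact ih _ (PySem.Set.nodup_inter _ _ h)

-- B's counter: the tally of c is the number of people whose distinct letters contain c
theorem counts_getD (ps : List (List Char)) (d : PySem.Dict Char Int) (c : Char) :
    (ps.foldl (fun d person =>
        (PySem.Set.ofList person).foldl (fun d c => d.insert c (d.getD c 0 + 1)) d) d).getD c 0
      = d.getD c 0 + (ps.countP (fun p => decide (c ∈ p)) : Int) := by
  induction ps generalizing d with
  | nil => simp
  | cons p ps ih =>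
    rw [List.foldl_cons, ih, PySem.Dict.getD_foldl_insert_add_one, List.countP_cons]
    by_cases hc : c ∈ p
    · rw [List.count_eq_one_of_mem (PySem.Set.nodup_ofList p) ((PySem.Set.mem_ofList p c).mpr hc)]
      simp [hc]; ring
    · rw [List.count_eq_zero_of_not_mem (fun h => hc ((PySem.Set.mem_ofList p c).mp h))]
      simp [hc]

theorem counts_keys_mem (ps : List (List Char)) (d : PySem.Dict Char Int) (c : Char) :
    c ∈ (ps.foldl (fun d person =>
        (PySem.Set.ofList person).foldl (fun d c => d.insert c (d.getD c 0 + 1)) d) d).keys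
      ↔ c ∈ d.keys ∨ ∃ p ∈ ps, c ∈ p := by
  induction ps generalizing d with
  | nil => simp
  | cons p ps ih =>
    rw [List.foldl_cons, ih, PySem.Dict.keys_foldl_insert]
    simp [PySem.Set.mem_update, PySem.Set.mem_ofList, or_assoc]

theorem counts_keys_nodup (ps : List (List Char)) (d : PySem.Dict Char Int) (h : d.keys.Nodup) :
    (ps.foldl (fun d person =>
        (PySem.Set.ofList person).foldl (fun d c => d.insert c (d.getD c 0 + 1)) d) d).keys.Nodup := by
  induction ps generalizing d with
  | nil => exact h
  | cons p ps ih => exact ih _ (PySem.Dict.nodup_keys_foldl_insert _ _ _ h)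

-- the per-group values agree
theorem group_eq (people : List (List Char)) :
    PySem.Set.len ((PySem.List.slice people (some 1)).foldl
        (fun letters person => PySem.Set.inter letters person)
        (PySem.Set.ofList (people.headD [])))
      = ((people.foldl (fun d person =>
            (PySem.Set.ofList person).foldl (fun d c => d.insert c (d.getD c 0 + 1)) d)
          PySem.Dict.empty).values.countP (fun v => v == (people.length : Int)) : Int) := by
  cases people with
  | nil => decide
  | cons p0 rest =>
    rw [PySem.List.slice_from (p0 :: rest) (by norm_num)]
    simp only [Int.toNat_one, List.drop_one, List.tail_cons, List.headD_cons]
    set D : PySem.Dict Char Int := (p0 :: rest).foldl (fun d person =>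
        (PySem.Set.ofList person).foldl (fun d c => d.insert c (d.getD c 0 + 1)) d)
        PySem.Dict.empty with hD
    have hknd : D.keys.Nodup := counts_keys_nodup (p0 :: rest) PySem.Dict.empty (by simp)
    rw [PySem.Dict.values_eq_map_keys D hknd 0, List.countP_map, List.countP_eq_length_filter]
    have hperm : (rest.foldl (fun l p => PySem.Set.inter l p) (PySem.Set.ofList p0)).Perm
        (D.keys.filter (fun k => ((D.getD k 0) == ((p0 :: rest).length : Int)))) := by
      rw [List.perm_ext_iff_of_nodup
        (nodup_foldl_inter rest _ (PySem.Set.nodup_ofList p0)) (hknd.filter _)]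
      intro c
      rw [List.mem_filter, mem_foldl_inter, PySem.Set.mem_ofList, hD,
        counts_keys_mem, counts_getD]
      simp only [PySem.Dict.keys_empty, PySem.Dict.getD_empty, List.not_mem_nil, false_or,
        zero_add, beq_iff_eq, Int.natCast_inj]
      constructor
      · rintro ⟨h0, hrest⟩
        have hall : ∀ p ∈ p0 :: rest, c ∈ p := by
          intro p hp; rcases List.mem_cons.mp hp with rfl | hp
          · exact h0
          · exact hrest p hp
        refine ⟨⟨p0, List.mem_cons_self, h0⟩, ?_⟩
        rw [List.countP_eq_length]
        intro p hp; exact decide_eq_true (hall p hp)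
      · rintro ⟨-, hcnt⟩
        have hall : ∀ p ∈ p0 :: rest, c ∈ p := by
          intro p hp
          have := (List.countP_eq_length.mp hcnt) p hp
          exact of_decide_eq_true this
        exact ⟨hall p0 List.mem_cons_self, fun p hp => hall p (List.mem_cons_of_mem _ hp)⟩
    simp [PySem.Set.len, hperm.length_eq, Function.comp_def, List.length_cons]

theorem fold_eq (gs : List (List Char)) (total : Int) :
    gs.foldl (fun total group =>
      let people := PySem.Chars.splitOn group ['\n']
      let letters := (PySem.List.slice people (some 1)).foldl
          (fun letters person => PySem.Set.inter letters person)
          (PySem.Set.ofList (people.headD []))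
      total + PySem.Set.len letters) total
    = gs.foldl (fun total group =>
      let people := PySem.Chars.splitOn group ['\n']
      let counts := people.foldl (fun d person =>
          (PySem.Set.ofList person).foldl (fun d c => d.insert c (d.getD c 0 + 1)) d)
        PySem.Dict.empty
      total + ((counts.values.countP (fun v => v == (people.length : Int))) : Int)) total := by
  induction gs generalizing total with
  | nil => rfl
  | cons g gs ih =>
    simp only [List.foldl_cons]
    rw [group_eq (PySem.Chars.splitOn g ['\n']), ih]

-- ===== VERDICT (by name: the statement is the Claim_ definition above) =====
theorem part_two_spec : Claim_equal_part_two := by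
  intro input _
  unfold Spec_part_two part_two part_two_alt
  exact fold_eq _ 0
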